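-- pv_equiv track=rewrite | github.com/Pradip19861/DSA | Accenture/headtail.py | headtailgame
-- ===== SOURCE A (Python) =====
-- def headtailgame(s):
--     score = 0
--     count = 0
--     for i in range(len(s)):
--         if s[i] == "H":
--             score += 2
--             count += 1
--         else:
--             score -= 1
--             count = 0
--
--         if count == 3:
--             return score
--
--     return score
-- ===== SOURCE B (Python) =====
-- def headtailgame(s):
--     # Locate the first "HHH": the loop in A stops right after its third H,
--     # so only the prefix up to there (or the whole string) is ever scored.
--     idx = s.find("HHH")
--     prefix = s if idx == -1 else s[:idx + 3]
--     return sum(2 if c == "H" else -1 for c in prefix)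
-- ===== Notes on version B (the rewrite author's own statement) =====
-- stated objective: simpler
-- what changed: Replaces the stateful per-character loop with an early-exit consecutive-H counter by a single substring search s.find("HHH") that determines the processed prefix, then a stateless per-character sum (+2 for H, -1 otherwise) over that prefix.
import Mathlib
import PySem

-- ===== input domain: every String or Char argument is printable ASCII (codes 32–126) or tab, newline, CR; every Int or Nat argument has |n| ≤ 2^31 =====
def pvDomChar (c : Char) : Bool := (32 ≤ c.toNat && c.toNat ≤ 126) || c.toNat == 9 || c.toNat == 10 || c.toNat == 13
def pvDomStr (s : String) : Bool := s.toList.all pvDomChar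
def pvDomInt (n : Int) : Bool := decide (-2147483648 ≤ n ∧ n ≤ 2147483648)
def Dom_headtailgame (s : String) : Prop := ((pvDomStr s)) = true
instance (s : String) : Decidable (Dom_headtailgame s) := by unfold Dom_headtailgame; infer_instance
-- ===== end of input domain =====

-- B replaces A's stateful early-exit loop by locating the first "HHH" with
-- substring search and summing a per-character score over the processed prefix
-- (objective: simpler; no speed claim).

-- ===== PORT A =====
-- the for-loop with its (score, count) state and the early 'return score' at count == 3
def headtailLoop : List Char → Int → Int → Int
  | [], score, _ => score
  | c :: rest, score, count =>
    let score' := if c == 'H' then score + 2 else score - 1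
    let count' := if c == 'H' then count + 1 else 0
    if count' == 3 then score' else headtailLoop rest score' count'

def headtailgame (s : String) : Int := headtailLoop s.toList 0 0

-- ===== PORT B =====
def headtailgame_alt (s : String) : Int :=
  let idx := PySem.Str.find s "HHH"
  let pre := if idx = -1 then s else PySem.Str.slice s none (some (idx + 3))
  (pre.toList.map (fun c => if c == 'H' then (2 : Int) else -1)).sum

-- ===== PRECONDITION & SPEC =====
def Spec_headtailgame (s : String) (out : Int) : Prop := out = headtailgame_alt s
instance (s : String) (out : Int) : Decidable (Spec_headtailgame s out) := by unfold Spec_headtailgame; infer_instance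

-- ===== CLAIM (what is proved, stated in full; the proofs are below) =====
def Claim_equal_headtailgame : Prop := ∀ (s : String), Dom_headtailgame s → Spec_headtailgame s (headtailgame s)

-- ===== LEMMAS AND PROOFS =====

-- per-character score of a processed prefix
def pvScore (l : List Char) : Int := (l.map (fun c => if c == 'H' then (2 : Int) else -1)).sum

-- B's computation, phrased over List Char
def pvB (l : List Char) : Int :=
  if PySem.Chars.find l ['H', 'H', 'H'] = -1 then pvScore l
  else pvScore (l.take (PySem.Chars.find l ['H', 'H', 'H'] + 3).toNat)

theorem pvAlt_eq (s : String) : headtailgame_alt s = pvB s.toList := by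
  unfold headtailgame_alt pvB pvScore
  have hsub : ("HHH" : String).toList = ['H', 'H', 'H'] := rfl
  by_cases h : PySem.Chars.find s.toList ['H', 'H', 'H'] = -1
  · simp [hsub, h]
  · have h3 : (0 : Int) ≤ PySem.Chars.find s.toList ['H', 'H', 'H'] + 3 := by
      have := PySem.Chars.neg_one_le_find s.toList ['H', 'H', 'H']
      omega
    simp [hsub, h, PySem.List.slice_to _ h3]

-- find points at k when there is an occurrence at k and none before
theorem pvFind_eq {l sub : List Char} (k : Nat) (h1 : sub <+: l.drop k)
    (h2 : ∀ i, i < k → ¬ sub <+: l.drop i) : PySem.Chars.find l sub = k := by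
  have hinf : sub <:+: l := h1.isInfix.trans (List.drop_suffix k l).isInfix
  have h0 : 0 ≤ PySem.Chars.find l sub := by
    have hne : ¬ PySem.Chars.find l sub = -1 := by
      rw [PySem.Chars.find_eq_neg_one_iff]
      exact fun h => h hinf
    have := PySem.Chars.neg_one_le_find l sub
    omega
  obtain ⟨ha, hb⟩ := PySem.Chars.find_spec h0
  have hk : (PySem.Chars.find l sub).toNat = k := by
    rcases lt_trichotomy (PySem.Chars.find l sub).toNat k with hlt | heq | hgt
    · exact absurd ha (h2 _ hlt)
    · exact heq
    · exact absurd h1 (hb k hgt)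
  omega

theorem pvFind_short {l : List Char} (h : l.length < 3) :
    PySem.Chars.find l ['H', 'H', 'H'] = -1 := by
  rw [PySem.Chars.find_eq_neg_one_iff]
  intro hinf
  have := hinf.length_le
  simp at this
  omega

theorem pvFind_HHH (rest : List Char) :
    PySem.Chars.find ('H' :: 'H' :: 'H' :: rest) ['H', 'H', 'H'] = 0 := by
  have := pvFind_eq (l := 'H' :: 'H' :: 'H' :: rest) (sub := ['H', 'H', 'H']) 0
    ⟨rest, rfl⟩ (fun i hi => absurd hi (Nat.not_lt_zero i))
  simpa using this

theorem pvFind_cons1 {x : Char} (rest : List Char) (hx : x ≠ 'H') :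
    PySem.Chars.find (x :: rest) ['H', 'H', 'H'] =
      if PySem.Chars.find rest ['H', 'H', 'H'] = -1 then -1
      else 1 + PySem.Chars.find rest ['H', 'H', 'H'] := by
  by_cases hr : PySem.Chars.find rest ['H', 'H', 'H'] = -1
  · rw [if_pos hr, PySem.Chars.find_eq_neg_one_iff]
    rw [PySem.Chars.find_eq_neg_one_iff] at hr
    intro hinf
    rcases List.infix_cons_iff.mp hinf with hp | hi
    · rcases List.cons_prefix_cons.mp hp with ⟨h1, _⟩
      exact hx h1.symm
    · exact hr hi
  · have h0 : 0 ≤ PySem.Chars.find rest ['H', 'H', 'H'] := by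
      have := PySem.Chars.neg_one_le_find rest ['H', 'H', 'H']
      omega
    obtain ⟨ha, hb⟩ := PySem.Chars.find_spec h0
    rw [if_neg hr]
    have key := pvFind_eq (l := x :: rest) (sub := ['H', 'H', 'H'])
      ((PySem.Chars.find rest ['H', 'H', 'H']).toNat + 1)
      (by simpa [List.drop_succ_cons] using ha)
      (by
        intro i hi
        match i with
        | 0 =>
          simp only [List.drop_zero]
          intro hp
          rcases List.cons_prefix_cons.mp hp with ⟨h1, _⟩
          exact hx h1.symm
        | j + 1 =>
          simp only [List.drop_succ_cons]
          exact hb j (by omega))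
    omega

theorem pvFind_cons2 {x : Char} (rest : List Char) (hx : x ≠ 'H') :
    PySem.Chars.find ('H' :: x :: rest) ['H', 'H', 'H'] =
      if PySem.Chars.find rest ['H', 'H', 'H'] = -1 then -1
      else 2 + PySem.Chars.find rest ['H', 'H', 'H'] := by
  by_cases hr : PySem.Chars.find rest ['H', 'H', 'H'] = -1
  · rw [if_pos hr, PySem.Chars.find_eq_neg_one_iff]
    rw [PySem.Chars.find_eq_neg_one_iff] at hr
    intro hinf
    rcases List.infix_cons_iff.mp hinf with hp | hi
    · rcases List.cons_prefix_cons.mp hp with ⟨_, hp2⟩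
      rcases List.cons_prefix_cons.mp hp2 with ⟨h2, _⟩
      exact hx h2.symm
    · rcases List.infix_cons_iff.mp hi with hp | hi2
      · rcases List.cons_prefix_cons.mp hp with ⟨h1, _⟩
        exact hx h1.symm
      · exact hr hi2
  · have h0 : 0 ≤ PySem.Chars.find rest ['H', 'H', 'H'] := by
      have := PySem.Chars.neg_one_le_find rest ['H', 'H', 'H']
      omega
    obtain ⟨ha, hb⟩ := PySem.Chars.find_spec h0
    rw [if_neg hr]
    have key := pvFind_eq (l := 'H' :: x :: rest) (sub := ['H', 'H', 'H'])
      ((PySem.Chars.find rest ['H', 'H', 'H']).toNat + 2)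
      (by simpa [List.drop_succ_cons] using ha)
      (by
        intro i hi
        match i with
        | 0 =>
          simp only [List.drop_zero]
          intro hp
          rcases List.cons_prefix_cons.mp hp with ⟨_, hp2⟩
          rcases List.cons_prefix_cons.mp hp2 with ⟨h2, _⟩
          exact hx h2.symm
        | 1 =>
          simp only [List.drop_succ_cons, List.drop_zero]
          intro hp
          rcases List.cons_prefix_cons.mp hp with ⟨h1, _⟩
          exact hx h1.symm
        | j + 2 =>
          simp only [List.drop_succ_cons]
          exact hb j (by omega))
    omega

theorem pvFind_cons3 {x : Char} (rest : List Char) (hx : x ≠ 'H') :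
    PySem.Chars.find ('H' :: 'H' :: x :: rest) ['H', 'H', 'H'] =
      if PySem.Chars.find rest ['H', 'H', 'H'] = -1 then -1
      else 3 + PySem.Chars.find rest ['H', 'H', 'H'] := by
  by_cases hr : PySem.Chars.find rest ['H', 'H', 'H'] = -1
  · rw [if_pos hr, PySem.Chars.find_eq_neg_one_iff]
    rw [PySem.Chars.find_eq_neg_one_iff] at hr
    intro hinf
    rcases List.infix_cons_iff.mp hinf with hp | hi
    · rcases List.cons_prefix_cons.mp hp with ⟨_, hp2⟩
      rcases List.cons_prefix_cons.mp hp2 with ⟨_, hp3⟩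
      rcases List.cons_prefix_cons.mp hp3 with ⟨h3, _⟩
      exact hx h3.symm
    · rcases List.infix_cons_iff.mp hi with hp | hi2
      · rcases List.cons_prefix_cons.mp hp with ⟨_, hp2⟩
        rcases List.cons_prefix_cons.mp hp2 with ⟨h2, _⟩
        exact hx h2.symm
      · rcases List.infix_cons_iff.mp hi2 with hp | hi3
        · rcases List.cons_prefix_cons.mp hp with ⟨h1, _⟩
          exact hx h1.symm
        · exact hr hi3
  · have h0 : 0 ≤ PySem.Chars.find rest ['H', 'H', 'H'] := by
      have := PySem.Chars.neg_one_le_find rest ['H', 'H', 'H']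
      omega
    obtain ⟨ha, hb⟩ := PySem.Chars.find_spec h0
    rw [if_neg hr]
    have key := pvFind_eq (l := 'H' :: 'H' :: x :: rest) (sub := ['H', 'H', 'H'])
      ((PySem.Chars.find rest ['H', 'H', 'H']).toNat + 3)
      (by simpa [List.drop_succ_cons] using ha)
      (by
        intro i hi
        match i with
        | 0 =>
          simp only [List.drop_zero]
          intro hp
          rcases List.cons_prefix_cons.mp hp with ⟨_, hp2⟩
          rcases List.cons_prefix_cons.mp hp2 with ⟨_, hp3⟩
          rcases List.cons_prefix_cons.mp hp3 with ⟨h3, _⟩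
          exact hx h3.symm
        | 1 =>
          simp only [List.drop_succ_cons, List.drop_zero]
          intro hp
          rcases List.cons_prefix_cons.mp hp with ⟨_, hp2⟩
          rcases List.cons_prefix_cons.mp hp2 with ⟨h2, _⟩
          exact hx h2.symm
        | 2 =>
          simp only [List.drop_succ_cons, List.drop_zero]
          intro hp
          rcases List.cons_prefix_cons.mp hp with ⟨h1, _⟩
          exact hx h1.symm
        | j + 3 =>
          simp only [List.drop_succ_cons]
          exact hb j (by omega))
    omega

theorem pvMain : ∀ (n : Nat) (l : List Char), l.length ≤ n → ∀ score : Int,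
    headtailLoop l score 0 = score + pvB l := by
  intro n
  induction n with
  | zero =>
    intro l hl score
    have hnil : l = [] := List.eq_nil_of_length_eq_zero (by omega)
    subst hnil
    simp [headtailLoop, pvB, pvScore, pvFind_short]
  | succ n ih =>
    intro l hl score
    rcases l with _ | ⟨a, l1⟩
    · simp [headtailLoop, pvB, pvScore, pvFind_short]
    by_cases ha : a = 'H'
    case neg =>
      -- first char is a tail: one loop step, then the shifted find
      have hstep : headtailLoop (a :: l1) score 0 = headtailLoop l1 (score - 1) 0 := by
        simp [headtailLoop, ha]
      rw [hstep, ih l1 (by simp at hl; omega) (score - 1)]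
      unfold pvB
      rw [pvFind_cons1 l1 ha]
      by_cases hr : PySem.Chars.find l1 ['H', 'H', 'H'] = -1
      · simp [hr, pvScore, ha]
        omega
      · have h0 : 0 ≤ PySem.Chars.find l1 ['H', 'H', 'H'] := by
          have := PySem.Chars.neg_one_le_find l1 ['H', 'H', 'H']
          omega
        rw [if_neg hr, if_neg (by omega), if_neg hr]
        have htn : (1 + PySem.Chars.find l1 ['H', 'H', 'H'] + 3).toNat =
            (PySem.Chars.find l1 ['H', 'H', 'H'] + 3).toNat + 1 := by omega
        rw [htn, List.take_succ_cons]
        simp [pvScore, ha]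
        omega
    subst ha
    rcases l1 with _ | ⟨b, l2⟩
    · -- l = ['H']
      simp [headtailLoop, pvB, pvScore, pvFind_short]
      try omega
    by_cases hb : b = 'H'
    case neg =>
      have hstep : headtailLoop ('H' :: b :: l2) score 0 = headtailLoop l2 (score + 2 - 1) 0 := by
        simp [headtailLoop, hb]
      rw [hstep, ih l2 (by simp at hl; omega) (score + 2 - 1)]
      unfold pvB
      rw [pvFind_cons2 l2 hb]
      by_cases hr : PySem.Chars.find l2 ['H', 'H', 'H'] = -1
      · simp [hr, pvScore, hb]
        omega
      · have h0 : 0 ≤ PySem.Chars.find l2 ['H', 'H', 'H'] := by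
          have := PySem.Chars.neg_one_le_find l2 ['H', 'H', 'H']
          omega
        rw [if_neg hr, if_neg (by omega), if_neg hr]
        have htn : (2 + PySem.Chars.find l2 ['H', 'H', 'H'] + 3).toNat =
            ((PySem.Chars.find l2 ['H', 'H', 'H'] + 3).toNat + 1) + 1 := by omega
        rw [htn, List.take_succ_cons, List.take_succ_cons]
        simp [pvScore, hb]
        omega
    subst hb
    rcases l2 with _ | ⟨c, l3⟩
    · -- l = ['H', 'H']
      simp [headtailLoop, pvB, pvScore, pvFind_short]
      try omega
    by_cases hc : c = 'H'
    case neg =>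
      have hstep : headtailLoop ('H' :: 'H' :: c :: l3) score 0 =
          headtailLoop l3 (score + 2 + 2 - 1) 0 := by
        simp [headtailLoop, hc]
      rw [hstep, ih l3 (by simp at hl; omega) (score + 2 + 2 - 1)]
      unfold pvB
      rw [pvFind_cons3 l3 hc]
      by_cases hr : PySem.Chars.find l3 ['H', 'H', 'H'] = -1
      · simp [hr, pvScore, hc]
        omega
      · have h0 : 0 ≤ PySem.Chars.find l3 ['H', 'H', 'H'] := by
          have := PySem.Chars.neg_one_le_find l3 ['H', 'H', 'H']
          omega
        rw [if_neg hr, if_neg (by omega), if_neg hr]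
        have htn : (3 + PySem.Chars.find l3 ['H', 'H', 'H'] + 3).toNat =
            (((PySem.Chars.find l3 ['H', 'H', 'H'] + 3).toNat + 1) + 1) + 1 := by omega
        rw [htn, List.take_succ_cons, List.take_succ_cons, List.take_succ_cons]
        simp [pvScore, hc]
        omega
    subst hc
    -- l starts with "HHH": the loop exits after the third H
    have hstep : headtailLoop ('H' :: 'H' :: 'H' :: l3) score 0 = score + 2 + 2 + 2 := by
      simp [headtailLoop]
    rw [hstep]
    unfold pvB
    rw [pvFind_HHH l3]
    norm_num
    simp [pvScore, List.take_succ_cons]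
    omega

-- ===== VERDICT (by name: the statement is the Claim_ definition above) =====
theorem headtailgame_spec : Claim_equal_headtailgame := by
  intro s _
  unfold Spec_headtailgame
  rw [pvAlt_eq]
  unfold headtailgame
  simpa using pvMain s.toList.length s.toList le_rfl 0
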